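-- pv_equiv track=rewrite | github.com/adr1en360/GradMatch | backend/project/views.py | parse_university_text
-- ===== SOURCE A (Python) =====
-- def parse_university_text(text):
--     universities = []
--     current_uni = {}
--
--     for line in text.strip().split('\n'):
--         line = line.strip()
--         if not line:
--             continue
--
--         if line.startswith('#UNIVERSITY'):
--             if current_uni:
--                 universities.append(current_uni)
--             current_uni = {}
--             continue
--
--         if ':' in line:
--             key, value = line.split(':', 1)
--             key = key.strip().lower()
--             value = value.strip()
--
--             if key == 'name':
--                 current_uni['name'] = value
--             elif key == 'chance':
--                 current_uni['chance'] = value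
--             elif key == 'reason':
--                 current_uni['reason'] = value
--             elif key == 'readiness':
--                 current_uni['readiness'] = value.rstrip('%')
--             elif key == 'suggestions':
--                 current_uni['suggestions'] = value
--
--     if current_uni:
--         universities.append(current_uni)
--
--     return universities
-- ===== SOURCE B (Python) =====
-- _KEYS = ('name', 'chance', 'reason', 'suggestions', 'readiness')
--
--
-- def parse_university_text(text):
--     # pass 1: cut the stripped non-empty lines into blocks at '#UNIVERSITY' markers
--     blocks, current = [], []
--     for raw in text.strip().split('\n'):
--         line = raw.strip()
--         if line.startswith('#UNIVERSITY'):
--             blocks.append(current)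
--             current = []
--         elif line:
--             current.append(line)
--     blocks.append(current)
--     # pass 2: one dict per block from its 'key: value' lines; keep non-empty dicts
--     result = []
--     for block in blocks:
--         uni = {}
--         for line in block:
--             if ':' in line:
--                 key, value = line.split(':', 1)
--                 key = key.strip().lower()
--                 if key in _KEYS:
--                     value = value.strip()
--                     uni[key] = value.rstrip('%') if key == 'readiness' else value
--         if uni:
--             result.append(uni)
--     return result
-- ===== Notes on version B (the rewrite author's own statement) =====
-- stated objective: alternative
-- what changed: B replaces A's single pass that builds dicts while scanning with a two-phase decomposition (first group stripped non-empty lines into blocks at '#UNIVERSITY' markers, then build one dict per block) and replaces A's five-branch elif chain with a key-set membership test and a single uniform insert.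
import Mathlib
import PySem

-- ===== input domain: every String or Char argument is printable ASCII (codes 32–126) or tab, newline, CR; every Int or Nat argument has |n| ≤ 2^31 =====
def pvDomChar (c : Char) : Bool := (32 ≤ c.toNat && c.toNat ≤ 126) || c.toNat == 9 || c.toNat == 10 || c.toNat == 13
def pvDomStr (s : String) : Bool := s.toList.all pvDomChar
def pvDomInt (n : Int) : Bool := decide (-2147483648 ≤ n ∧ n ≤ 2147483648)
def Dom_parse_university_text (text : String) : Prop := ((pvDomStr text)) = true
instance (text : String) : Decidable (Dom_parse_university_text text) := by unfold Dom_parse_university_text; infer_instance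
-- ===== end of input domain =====

-- B parses the same blocks in two phases (group lines at '#UNIVERSITY' markers, then one dict per
-- block via a key-set membership test) instead of A's single pass with an elif chain: alternative
-- decomposition, same cost.

-- shared exact port of Python's value.rstrip('%') (strip '%' characters from the right)
def pyRstripPct (s : String) : String := String.ofList ((s.toList.reverse.dropWhile (· == '%')).reverse)

-- ===== PORT A =====
-- loop body of A's single for-loop; state = (universities, current_uni)
def pvAStep (st : List (PySem.Dict String String) × PySem.Dict String String) (raw : String) :
    List (PySem.Dict String String) × PySem.Dict String String :=
  let line := PySem.Str.strip raw
  if line = "" then st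
  else if PySem.Str.startswith line "#UNIVERSITY" then
    ((if st.2.size ≠ 0 then st.1 ++ [st.2] else st.1), PySem.Dict.empty)
  else if PySem.Str.isIn ":" line then
    match PySem.Str.splitMax? line ":" 1 with
    | some (key0 :: value0 :: _) =>
      let key := PySem.Str.lower (PySem.Str.strip key0)
      let value := PySem.Str.strip value0
      if key = "name" then (st.1, st.2.insert "name" value)
      else if key = "chance" then (st.1, st.2.insert "chance" value)
      else if key = "reason" then (st.1, st.2.insert "reason" value)
      else if key = "readiness" then (st.1, st.2.insert "readiness" (pyRstripPct value))
      else if key = "suggestions" then (st.1, st.2.insert "suggestions" value)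
      else st
    | _ => st
  else st

def parse_university_text (text : String) : List (List (String × String)) :=
  let st := ((PySem.Str.split? (PySem.Str.strip text) "\n").getD []).foldl pvAStep
              ([], PySem.Dict.empty)
  (if st.2.size ≠ 0 then st.1 ++ [st.2] else st.1).map (fun d => d.items)

-- ===== PORT B =====
def pvKeys : List String := ["name", "chance", "reason", "suggestions", "readiness"]

-- pass 1 loop body; state = (blocks, current)
def pvBlockStep (st : List (List String) × List String) (raw : String) :
    List (List String) × List String :=
  let line := PySem.Str.strip raw
  if PySem.Str.startswith line "#UNIVERSITY" then (st.1 ++ [st.2], [])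
  else if line ≠ "" then (st.1, st.2 ++ [line])
  else st

-- inner loop body of pass 2
def pvParseLine (uni : PySem.Dict String String) (line : String) : PySem.Dict String String :=
  if PySem.Str.isIn ":" line then
    match PySem.Str.splitMax? line ":" 1 with
    | some (key0 :: value0 :: _) =>
      let key := PySem.Str.lower (PySem.Str.strip key0)
      if key ∈ pvKeys then
        let value := PySem.Str.strip value0
        uni.insert key (if key = "readiness" then pyRstripPct value else value)
      else uni
    | _ => uni
  else uni

def pvBlockDict (block : List String) : PySem.Dict String String :=
  block.foldl pvParseLine PySem.Dict.empty

def parse_university_text_alt (text : String) : List (List (String × String)) :=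
  let st := ((PySem.Str.split? (PySem.Str.strip text) "\n").getD []).foldl pvBlockStep ([], [])
  (st.1 ++ [st.2]).foldl
    (fun res b =>
      let uni := pvBlockDict b
      if uni.size ≠ 0 then res ++ [uni.items] else res) []

-- ===== PRECONDITION & SPEC =====
def Spec_parse_university_text (text : String) (out : List (List (String × String))) : Prop := out = parse_university_text_alt text
instance (text : String) (out : List (List (String × String))) : Decidable (Spec_parse_university_text text out) := by unfold Spec_parse_university_text; infer_instance

-- ===== CLAIM (what is proved, stated in full; the proofs are below) =====
def Claim_equal_parse_university_text : Prop := ∀ (text : String), Dom_parse_university_text text → Spec_parse_university_text text (parse_university_text text)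

-- ===== LEMMAS AND PROOFS =====

-- B's pass-2 result on a list of blocks, in filter/map form
def pvProc (bs : List (List String)) : List (List (String × String)) :=
  (bs.filter (fun b => decide ((pvBlockDict b).size ≠ 0))).map (fun b => (pvBlockDict b).items)

lemma pvProc_eq_foldl (bs : List (List String)) :
    bs.foldl (fun res b =>
        let uni := pvBlockDict b
        if uni.size ≠ 0 then res ++ [uni.items] else res) [] = pvProc bs := by
  simpa [pvProc] using
    (PySem.List.foldl_append_ite (l := bs) (acc := [])
      (p := fun b => (pvBlockDict b).size ≠ 0) (f := fun b => (pvBlockDict b).items))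

lemma pvProc_append_singleton (bs : List (List String)) (g : List String) :
    pvProc (bs ++ [g]) =
      pvProc bs ++ (if (pvBlockDict g).size ≠ 0 then [(pvBlockDict g).items] else []) := by
  by_cases h : (pvBlockDict g).size ≠ 0 <;> simp [pvProc, h]

lemma pvBlockDict_append (g : List String) (line : String) :
    pvBlockDict (g ++ [line]) = pvParseLine (pvBlockDict g) line := by
  simp [pvBlockDict]

-- the content branch of A's loop body equals B's line parser (elif chain vs key-set membership)
lemma pvStep_content (us : List (PySem.Dict String String)) (cur : PySem.Dict String String)
    (raw : String) (line : String) (hline : PySem.Str.strip raw = line)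
    (h0 : ¬ line = "") (h1 : PySem.Str.startswith line "#UNIVERSITY" = false) :
    pvAStep (us, cur) raw = (us, pvParseLine cur line) := by
  subst hline
  simp only [pvAStep, pvParseLine, h0, h1, if_false, Bool.false_eq_true]
  cases hin : PySem.Str.isIn ":" (PySem.Str.strip raw) with
  | false => simp
  | true =>
    simp only [if_true]
    cases hsp : PySem.Str.splitMax? (PySem.Str.strip raw) ":" 1 with
    | none => rfl
    | some parts =>
      match parts with
      | [] => rfl
      | [_] => rfl
      | key0 :: value0 :: rest =>
        simp only []
        by_cases hn : PySem.Str.lower (PySem.Str.strip key0) = "name"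
        · simp [hn, pvKeys]
        · by_cases hc : PySem.Str.lower (PySem.Str.strip key0) = "chance"
          · simp [hc, pvKeys]
          · by_cases hr : PySem.Str.lower (PySem.Str.strip key0) = "reason"
            · simp [hr, pvKeys]
            · by_cases hd : PySem.Str.lower (PySem.Str.strip key0) = "readiness"
              · simp [hd, pvKeys]
              · by_cases hs : PySem.Str.lower (PySem.Str.strip key0) = "suggestions"
                · simp [hs, pvKeys]
                · simp [hn, hc, hr, hd, hs, pvKeys]

-- main invariant: running A's loop from (us, dict-of-g) matches B's grouping from (bs, g)
lemma pvMain (lines : List String) :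
    ∀ (us : List (PySem.Dict String String)) (bs : List (List String)) (g : List String),
      us.map (fun d => d.items) = pvProc bs →
      (let st := lines.foldl pvAStep (us, pvBlockDict g)
       (if st.2.size ≠ 0 then st.1 ++ [st.2] else st.1).map (fun d => d.items)) =
      (let st' := lines.foldl pvBlockStep (bs, g)
       pvProc (st'.1 ++ [st'.2])) := by
  induction lines with
  | nil =>
    intro us bs g h
    simp only [List.foldl_nil, pvProc_append_singleton, ← h]
    by_cases hg : (pvBlockDict g).size ≠ 0 <;> simp [hg]
  | cons raw rest ih =>
    intro us bs g h
    simp only [List.foldl_cons]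
    by_cases h0 : PySem.Str.strip raw = ""
    · have ha : pvAStep (us, pvBlockDict g) raw = (us, pvBlockDict g) := by
        simp [pvAStep, h0]
      have hb : pvBlockStep (bs, g) raw = (bs, g) := by
        simp [pvBlockStep, h0]
        decide
      rw [ha, hb]; exact ih us bs g h
    · cases hm : PySem.Str.startswith (PySem.Str.strip raw) "#UNIVERSITY" with
      | true =>
        have hm' : PySem.Chars.startswith (PySem.Chars.strip raw.toList)
            ['#', 'U', 'N', 'I', 'V', 'E', 'R', 'S', 'I', 'T', 'Y'] = true := by
          simpa using hm
        have ha : pvAStep (us, pvBlockDict g) raw =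
            ((if (pvBlockDict g).size ≠ 0 then us ++ [pvBlockDict g] else us),
              PySem.Dict.empty) := by
          simp [pvAStep, h0, hm']
        have hb : pvBlockStep (bs, g) raw = (bs ++ [g], []) := by
          simp [pvBlockStep, hm']
        rw [ha, hb]
        have hempty : (PySem.Dict.empty : PySem.Dict String String) = pvBlockDict [] := rfl
        rw [hempty]
        apply ih
        rw [pvProc_append_singleton]
        by_cases hg : (pvBlockDict g).size ≠ 0 <;> simp [hg, ← h]
      | false =>
        have hm' : PySem.Chars.startswith (PySem.Chars.strip raw.toList)
            ['#', 'U', 'N', 'I', 'V', 'E', 'R', 'S', 'I', 'T', 'Y'] = false := by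
          simpa using hm
        have ha := pvStep_content us (pvBlockDict g) raw (PySem.Str.strip raw) rfl h0 hm
        have hb : pvBlockStep (bs, g) raw = (bs, g ++ [PySem.Str.strip raw]) := by
          simp [pvBlockStep, hm', h0]
        rw [ha, hb, ← pvBlockDict_append]
        exact ih us bs (g ++ [PySem.Str.strip raw]) h

-- ===== VERDICT (by name: the statement is the Claim_ definition above) =====
theorem parse_university_text_spec : Claim_equal_parse_university_text := by
  intro text _
  unfold Spec_parse_university_text parse_university_text parse_university_text_alt
  rw [pvProc_eq_foldl]
  have hempty : (PySem.Dict.empty : PySem.Dict String String) = pvBlockDict [] := rfl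
  rw [hempty]
  exact pvMain ((PySem.Str.split? (PySem.Str.strip text) "\n").getD []) [] [] []
    (by simp [pvProc])
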